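-- pv_equiv track=rewrite | github.com/FeebleOldMan/references | hackerrank/algorithms/implementation/jumping_on_the_clouds_revisited.py | fuel_left
-- ===== SOURCE A (Python) =====
-- def fuel_left(clouds, distance, cloud_map):
--     pos = 0
--     energy = 100
--     while True:
--         pos = (pos + distance) % clouds
--         energy -= 1 + (2 * cloud_map[pos])
--         if pos == 0:
--             return energy
-- ===== SOURCE B (Python) =====
-- def fuel_left(clouds, distance, cloud_map):
--     # closed form: the walk returns to 0 after abs(clouds) // gcd(clouds, distance) jumps
--     g, d = abs(clouds), abs(distance)
--     while d:
--         g, d = d, g % d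
--     steps = abs(clouds) // g
--     return 100 - steps - 2 * sum(cloud_map[(distance * i) % clouds] for i in range(1, steps + 1))
-- ===== Notes on version B (the rewrite author's own statement) =====
-- stated objective: alternative
-- what changed: Replaces A's 'loop until position returns to 0' sentinel simulation with a gcd-based closed form for the number of jumps (steps = |clouds| // gcd(clouds, distance)) and a fixed-count sum over the visited positions (distance*i) % clouds.
import Mathlib
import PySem

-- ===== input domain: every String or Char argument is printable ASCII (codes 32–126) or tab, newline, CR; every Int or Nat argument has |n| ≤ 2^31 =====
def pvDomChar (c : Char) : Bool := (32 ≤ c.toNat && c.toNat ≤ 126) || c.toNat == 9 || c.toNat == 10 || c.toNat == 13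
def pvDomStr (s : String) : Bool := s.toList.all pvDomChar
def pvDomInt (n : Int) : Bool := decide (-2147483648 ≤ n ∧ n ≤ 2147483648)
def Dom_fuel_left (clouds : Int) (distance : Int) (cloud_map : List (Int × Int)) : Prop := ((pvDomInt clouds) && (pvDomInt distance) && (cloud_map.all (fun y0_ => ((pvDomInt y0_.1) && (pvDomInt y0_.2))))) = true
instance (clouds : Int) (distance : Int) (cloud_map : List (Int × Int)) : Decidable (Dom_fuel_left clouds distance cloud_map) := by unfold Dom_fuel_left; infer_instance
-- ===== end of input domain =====

-- B replaces A's loop-until-back-at-0 simulation by the gcd closed form for the number of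
-- jumps plus a fixed-count sum over the visited positions (an alternative, not faster).

-- ===== PORT A =====
-- dict lookup, first match; 'none' is Python's KeyError (excluded by Pre_), default 0 is junk there
def pvLookup? (m : List (Int × Int)) (k : Int) : Option Int := (m.find? (·.1 == k)).map (·.2)
def pvLookupD (m : List (Int × Int)) (k : Int) : Int := (pvLookup? m k).getD 0

-- the 'while True' loop; fuel only makes it total (it exits within |clouds| iterations when clouds ≠ 0)
def fuelLoopA (clouds distance : Int) (cloud_map : List (Int × Int)) : Nat → Int → Int → Int
  | 0, _, energy => energy
  | fuel+1, pos, energy =>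
    let pos' := PySem.Int.mod (pos + distance) clouds
    let energy' := energy - (1 + 2 * pvLookupD cloud_map pos')
    if pos' = 0 then energy' else fuelLoopA clouds distance cloud_map fuel pos' energy'

def fuel_left (clouds : Int) (distance : Int) (cloud_map : List (Int × Int)) : Int :=
  fuelLoopA clouds distance cloud_map (clouds.natAbs + 1) 0 100

-- ===== PORT B =====
-- Source B's Euclid 'while d: g, d = d, g % d'; fuel only makes it total (d strictly decreases)
def bGcdF : Nat → Nat → Nat → Nat
  | 0, g, _ => g
  | f+1, g, d => if d = 0 then g else bGcdF f d (g % d)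

def bGcd (g d : Nat) : Nat := bGcdF d g d

def fuel_left_alt (clouds : Int) (distance : Int) (cloud_map : List (Int × Int)) : Int :=
  let g := bGcd clouds.natAbs distance.natAbs
  let steps := PySem.Int.floordiv (clouds.natAbs : Int) (g : Int)
  100 - steps - 2 * ((PySem.List.pyRange 1 (steps + 1) 1).map
      (fun i => pvLookupD cloud_map (PySem.Int.mod (distance * i) clouds))).sum

-- ===== PRECONDITION & SPEC =====
def stepsOf (clouds distance : Int) : Nat := clouds.natAbs / Int.gcd clouds distance

-- Pre_ excludes exactly the inputs where Python A raises: clouds == 0 (ZeroDivisionError)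
-- or a visited position missing from cloud_map (KeyError).
-- ('steps ≤ length' is implied by the key condition — the steps visited positions are pairwise
-- distinct — and only lets the instance decide the conjunction without enumerating a huge range.)
def Pre_fuel_left (clouds : Int) (distance : Int) (cloud_map : List (Int × Int)) : Prop :=
  clouds ≠ 0 ∧ stepsOf clouds distance ≤ cloud_map.length ∧ ∀ k : Nat, k < stepsOf clouds distance →
    (pvLookup? cloud_map (PySem.Int.mod (distance * ((k : Int) + 1)) clouds)).isSome
instance (clouds : Int) (distance : Int) (cloud_map : List (Int × Int)) : Decidable (Pre_fuel_left clouds distance cloud_map) := by unfold Pre_fuel_left; infer_instance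

def pvWitness_fuel_left : Int × Int × (List (Int × Int)) := (2, 1, [(0, 0), (1, -3)])

def Spec_fuel_left (clouds : Int) (distance : Int) (cloud_map : List (Int × Int)) (out : Int) : Prop := out = fuel_left_alt clouds distance cloud_map
instance (clouds : Int) (distance : Int) (cloud_map : List (Int × Int)) (out : Int) : Decidable (Spec_fuel_left clouds distance cloud_map out) := by unfold Spec_fuel_left; infer_instance

-- ===== CLAIM (what is proved, stated in full; the proofs are below) =====
def Claim_equal_fuel_left : Prop := ∀ (clouds : Int) (distance : Int) (cloud_map : List (Int × Int)), Dom_fuel_left clouds distance cloud_map → Pre_fuel_left clouds distance cloud_map → Spec_fuel_left clouds distance cloud_map (fuel_left clouds distance cloud_map)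

-- ===== LEMMAS AND PROOFS =====

-- the position after j jumps
def posAtN (clouds distance : Int) (j : Nat) : Int := PySem.Int.mod (distance * (j : Int)) clouds

lemma bGcdF_eq (f g d : Nat) (h : d ≤ f) : bGcdF f g d = Nat.gcd d g := by
  induction f generalizing g d with
  | zero => interval_cases d; simp [bGcdF]
  | succ f ih =>
    by_cases hd : d = 0
    · simp [bGcdF, hd]
    · rw [bGcdF, if_neg hd, ih d (g % d) (by have := Nat.mod_lt g (Nat.pos_of_ne_zero hd); omega)]
      exact (Nat.gcd_rec d g).symm

lemma bGcd_eq (g d : Nat) : bGcd g d = Nat.gcd d g := bGcdF_eq d g d le_rfl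

lemma gcd_pos (clouds distance : Int) (hc : clouds ≠ 0) : 0 < Int.gcd clouds distance :=
  Nat.gcd_pos_of_pos_left _ (Int.natAbs_pos.mpr hc)

lemma steps_pos (clouds distance : Int) (hc : clouds ≠ 0) : 0 < stepsOf clouds distance :=
  Nat.div_pos (Nat.le_of_dvd (Int.natAbs_pos.mpr hc) (Nat.gcd_dvd_left _ _)) (gcd_pos clouds distance hc)

lemma dvd_iff_steps_dvd (clouds distance : Int) (hc : clouds ≠ 0) (i : Nat) :
    clouds ∣ distance * (i : Int) ↔ stepsOf clouds distance ∣ i := by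
  have hg : 0 < Int.gcd clouds distance := gcd_pos clouds distance hc
  rw [← Int.natAbs_dvd, Int.ofNat_dvd_left, Int.natAbs_mul, Int.natAbs_natCast]
  set n := clouds.natAbs
  set d := distance.natAbs
  have hgn : Nat.gcd n d ∣ n := Nat.gcd_dvd_left n d
  have hgd : Nat.gcd n d ∣ d := Nat.gcd_dvd_right n d
  have hstep : stepsOf clouds distance = n / Nat.gcd n d := rfl
  have hco : Nat.Coprime (n / Nat.gcd n d) (d / Nat.gcd n d) :=
    Nat.coprime_div_gcd_div_gcd hg
  have h1 : n ∣ d * i ↔ Nat.gcd n d * (n / Nat.gcd n d) ∣ Nat.gcd n d * (d / Nat.gcd n d * i) := by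
    rw [Nat.mul_div_cancel' hgn, ← Nat.mul_assoc, Nat.mul_div_cancel' hgd]
  have hg' : 0 < Nat.gcd n d := hg
  rw [hstep, h1, Nat.mul_dvd_mul_iff_left hg']
  exact ⟨fun h => hco.dvd_of_dvd_mul_left h, fun h => h.mul_left _⟩

lemma posAtN_succ (clouds distance : Int) (i : Nat) :
    PySem.Int.mod (posAtN clouds distance i + distance) clouds = posAtN clouds distance (i + 1) := by
  simp only [posAtN, PySem.Int.mod]
  rw [Int.fmod_add_fmod]
  congr 1
  push_cast
  ring

lemma posAtN_eq_zero_iff (clouds distance : Int) (hc : clouds ≠ 0) (i : Nat) :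
    posAtN clouds distance i = 0 ↔ stepsOf clouds distance ∣ i := by
  rw [posAtN, PySem.Int.mod_eq_zero_iff_dvd, dvd_iff_steps_dvd clouds distance hc]

lemma loopA_eq (clouds distance : Int) (m : List (Int × Int)) (hc : clouds ≠ 0) :
    ∀ (f i : Nat) (e : Int), i < stepsOf clouds distance → stepsOf clouds distance - i ≤ f →
    fuelLoopA clouds distance m f (posAtN clouds distance i) e
      = e - ((List.range (stepsOf clouds distance - i)).map
          (fun k => 1 + 2 * pvLookupD m (posAtN clouds distance (i + 1 + k)))).sum := by
  intro f
  induction f with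
  | zero => intro i e hi hf; omega
  | succ f ih =>
    intro i e hi hf
    rw [fuelLoopA]
    simp only [posAtN_succ]
    by_cases h : i + 1 = stepsOf clouds distance
    · have hz : posAtN clouds distance (i + 1) = 0 :=
        (posAtN_eq_zero_iff clouds distance hc (i + 1)).mpr (h ▸ dvd_refl _)
      rw [if_pos hz]
      have hSi : stepsOf clouds distance - i = 1 := by omega
      rw [hSi]
      simp
    · have hz : posAtN clouds distance (i + 1) ≠ 0 := by
        intro h0
        have hdvd := (posAtN_eq_zero_iff clouds distance hc (i + 1)).mp h0
        have := Nat.le_of_dvd (by omega) hdvd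
        omega
      rw [if_neg hz, ih (i + 1) _ (by omega) (by omega)]
      have hSi : stepsOf clouds distance - i = (stepsOf clouds distance - (i + 1)) + 1 := by omega
      rw [hSi, List.range_succ_eq_map, List.map_cons, List.map_map, List.sum_cons]
      have hfun : (List.range (stepsOf clouds distance - (i + 1))).map
            ((fun k => 1 + 2 * pvLookupD m (posAtN clouds distance (i + 1 + k))) ∘ Nat.succ)
          = (List.range (stepsOf clouds distance - (i + 1))).map
            (fun k => 1 + 2 * pvLookupD m (posAtN clouds distance (i + 1 + 1 + k))) := by
        apply List.map_congr_left
        intro k _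
        simp only [Function.comp]
        have : i + 1 + Nat.succ k = i + 1 + 1 + k := by omega
        rw [this]
      rw [hfun]
      ring

lemma sum_one_add_two (v : Nat → Int) (l : List Nat) :
    (l.map (fun k => 1 + 2 * v k)).sum = l.length + 2 * (l.map v).sum := by
  induction l with
  | nil => simp
  | cons a l ih => simp [ih]; ring

lemma fuel_left_eq (clouds distance : Int) (m : List (Int × Int)) (hc : clouds ≠ 0) :
    fuel_left clouds distance m
      = 100 - ((List.range (stepsOf clouds distance)).map
          (fun k => 1 + 2 * pvLookupD m (posAtN clouds distance (1 + k)))).sum := by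
  have h0 : (0 : Int) = posAtN clouds distance 0 := by
    simp [posAtN, PySem.Int.mod, Int.zero_fmod]
  rw [fuel_left, h0, loopA_eq clouds distance m hc _ 0 100 (steps_pos clouds distance hc)
      (by have := Nat.div_le_self clouds.natAbs (Int.gcd clouds distance); unfold stepsOf; omega)]
  simp

lemma fuel_left_alt_eq (clouds distance : Int) (m : List (Int × Int)) :
    fuel_left_alt clouds distance m
      = 100 - (stepsOf clouds distance : Int)
          - 2 * ((List.range (stepsOf clouds distance)).map
              (fun k => pvLookupD m (posAtN clouds distance (1 + k)))).sum := by
  simp only [fuel_left_alt]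
  rw [bGcd_eq]
  have hg : Nat.gcd distance.natAbs clouds.natAbs = Int.gcd clouds distance := Nat.gcd_comm _ _
  rw [hg, PySem.Int.floordiv_natCast]
  have hsteps : clouds.natAbs / Int.gcd clouds distance = stepsOf clouds distance := rfl
  rw [hsteps, PySem.List.pyRange_one]
  have hb : (((stepsOf clouds distance : Int) + 1) - 1).toNat = stepsOf clouds distance := by
    simp
  rw [hb, List.map_map]
  congr 2

-- ===== VERDICT (by name: the statement is the Claim_ definition above) =====
theorem fuel_left_spec : Claim_equal_fuel_left := by
  intro clouds distance cloud_map _ hpre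
  unfold Spec_fuel_left
  rw [fuel_left_eq clouds distance cloud_map hpre.1,
      fuel_left_alt_eq clouds distance cloud_map,
      sum_one_add_two]
  simp
  ring
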